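-- pv_equiv track=rewrite | github.com/MichiganNLP/video-fill-in-the-blank | generate-multi-video-data.py | find_maximum_N
-- ===== SOURCE A (Python) =====
-- def find_maximum_N(LeftSpace,N): # find the indexes of the maximum N values of LeftSpace
--     left_space = LeftSpace[:]
--     temp = []
--     for i in range(N):
--         max_index = left_space.index(max(left_space))
--         temp.append(max_index)
--         left_space[max_index] -= 1
--     return temp
-- ===== SOURCE B (Python) =====
-- def find_maximum_N(LeftSpace, N):
--     # Keep the candidates in a list sorted ascending by (value, -index):
--     # its LAST element is always the next pick (maximum value, smallest index).
--     key = sorted((v, -i) for i, v in enumerate(LeftSpace))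
--     temp = []
--     for _ in range(N):
--         v, ni = key.pop()
--         temp.append(-ni)
--         item = (v - 1, ni)
--         lo, hi = 0, len(key)
--         while lo < hi:          # binary search for the insertion point
--             mid = (lo + hi) // 2
--             if key[mid] < item:
--                 lo = mid + 1
--             else:
--                 hi = mid
--         key.insert(lo, item)
--     return temp
-- ===== Notes on version B (the rewrite author's own statement) =====
-- stated objective: faster
-- what changed: Instead of rescanning the whole list with max() and list.index() on every one of the N iterations, B sorts (value,-index) pairs once and then keeps that list sorted, popping the last element (the current argmax) in O(1) and re-inserting the decremented pair at the position found by a hand-written binary search.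
import Mathlib
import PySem

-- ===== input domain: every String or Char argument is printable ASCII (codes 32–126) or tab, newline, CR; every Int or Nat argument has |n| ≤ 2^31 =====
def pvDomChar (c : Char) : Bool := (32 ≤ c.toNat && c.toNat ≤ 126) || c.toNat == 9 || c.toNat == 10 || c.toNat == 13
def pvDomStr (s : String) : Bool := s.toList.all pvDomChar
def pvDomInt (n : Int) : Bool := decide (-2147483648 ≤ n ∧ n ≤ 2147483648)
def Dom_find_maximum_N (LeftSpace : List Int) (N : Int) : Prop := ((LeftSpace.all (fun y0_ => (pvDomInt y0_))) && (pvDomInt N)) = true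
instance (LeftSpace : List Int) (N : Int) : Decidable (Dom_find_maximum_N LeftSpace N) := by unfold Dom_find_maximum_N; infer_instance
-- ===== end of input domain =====

-- B replaces A's per-iteration max()+index() rescans by one initial sort of (value, -index)
-- pairs kept sorted with a binary-search reinsertion; return values proved equal on Pre_
-- (A mutates only its private copy, so there is no observable side effect to match).

-- ===== PORT A =====
-- for i in range(N): max_index = left_space.index(max(left_space)); temp.append(max_index); left_space[max_index] -= 1
def pvALoop : Nat → List Int → List Int → List Int
  | 0, _, temp => temp
  | n + 1, ls, temp =>
    match PySem.List.max? ls (fun x => x) with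
    | none => temp          -- Python: max([]) raises ValueError; excluded by Pre_
    | some m =>
      match PySem.List.index? ls m with
      | none => temp        -- unreachable: max is a member
      | some j => pvALoop n (ls.set j (ls.getD j 0 - 1)) (temp ++ [(j : Int)])

def find_maximum_N (LeftSpace : List Int) (N : Int) : List Int :=
  pvALoop N.toNat (PySem.List.slice LeftSpace none none) []

-- ===== PORT B =====
-- Python tuple comparison 'a < b' on int pairs (lexicographic)
def pvTlt (a b : Int × Int) : Bool := decide (a.1 < b.1) || (decide (a.1 = b.1) && decide (a.2 < b.2))

-- the hand-written 'while lo < hi' binary-search loop of Source B, step for step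
def pvBisect (key : List (Int × Int)) (item : Int × Int) (lo hi : Nat) : Nat :=
  if h : lo < hi then
    let mid := (lo + hi) / 2
    if pvTlt (PySem.List.pyGetD key (mid : Int) (0, 0)) item then
      pvBisect key item (mid + 1) hi
    else
      pvBisect key item lo mid
  else lo
termination_by hi - lo
decreasing_by
  · omega
  · omega

-- for _ in range(N): v, ni = key.pop(); temp.append(-ni); binary-search lo; key.insert(lo, (v-1, ni))
def pvBLoop : Nat → List (Int × Int) → List Int → List Int
  | 0, _, temp => temp
  | n + 1, key, temp =>
    match PySem.List.pop? key with
    | none => temp          -- Python: [].pop() raises IndexError; excluded by Pre_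
    | some ((v, ni), rest) =>
      let item : Int × Int := (v - 1, ni)
      let lo := pvBisect rest item 0 rest.length
      pvBLoop n (PySem.List.insert rest (lo : Int) item) (temp ++ [-ni])

def find_maximum_N_alt (LeftSpace : List Int) (N : Int) : List Int :=
  pvBLoop N.toNat
    (PySem.List.sorted2 ((PySem.List.enumerate LeftSpace 0).map (fun p => (p.2, -p.1)))
      (fun q => q.1) (fun q => q.2)) []

-- ===== PRECONDITION & SPEC =====
-- Pre_ excludes only the inputs where A raises: LeftSpace = [] with N ≥ 1 (max([]) is a ValueError).
def Pre_find_maximum_N (LeftSpace : List Int) (N : Int) : Prop := LeftSpace ≠ [] ∨ N ≤ 0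
instance (LeftSpace : List Int) (N : Int) : Decidable (Pre_find_maximum_N LeftSpace N) := by unfold Pre_find_maximum_N; infer_instance
def pvWitness_find_maximum_N : List Int × Int := ([2, 1], 3)

def Spec_find_maximum_N (LeftSpace : List Int) (N : Int) (out : List Int) : Prop := out = find_maximum_N_alt LeftSpace N
instance (LeftSpace : List Int) (N : Int) (out : List Int) : Decidable (Spec_find_maximum_N LeftSpace N out) := by unfold Spec_find_maximum_N; infer_instance

-- ===== CLAIM (what is proved, stated in full; the proofs are below) =====
def Claim_equal_find_maximum_N : Prop := ∀ (LeftSpace : List Int) (N : Int), Dom_find_maximum_N LeftSpace N → Pre_find_maximum_N LeftSpace N → Spec_find_maximum_N LeftSpace N (find_maximum_N LeftSpace N)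

-- ===== LEMMAS AND PROOFS =====

-- the multiset B keeps sorted: one (value, -index) pair per position of ls
def pvPairs (ls : List Int) : List (Int × Int) :=
  (PySem.List.enumerate ls 0).map (fun p => (p.2, -p.1))

-- the strict lexicographic order pvTlt decides
def pvLt (a b : Int × Int) : Prop := toLex a < toLex b

theorem pvTlt_iff (a b : Int × Int) : pvTlt a b = true ↔ pvLt a b := by
  simp [pvTlt, pvLt, Prod.Lex.lt_iff]

theorem pvLt_trans {a b c : Int × Int} : pvLt a b → pvLt b c → pvLt a c := by
  exact fun h1 h2 => lt_trans h1 h2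

theorem pvLt_of_le_of_ne {a b : Int × Int} (h : ¬ pvLt a b) (hne : b ≠ a) : pvLt b a := by
  have hle : toLex b ≤ toLex a := not_lt.mp h
  exact lt_of_le_of_ne hle (fun hE => hne (by simpa using hE))

theorem pvTlt_false_iff (a b : Int × Int) : pvTlt a b = false ↔ ¬ pvLt a b := by
  rw [← Bool.not_eq_true, not_iff_not, pvTlt_iff]

-- sorted2 with the two projections is sorting by the lexicographic key
theorem pvSorted2_eq (xs : List (Int × Int)) :
    PySem.List.sorted2 xs (fun q => q.1) (fun q => q.2) =
      PySem.List.sorted xs (fun q => toLex q) := by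
  unfold PySem.List.sorted2 PySem.List.sorted
  simp only [Bool.false_eq_true, if_false]
  congr 1
  funext acc x
  congr 1
  funext a b
  by_cases h1 : a.1 < b.1 <;> by_cases h2 : b.1 < a.1 <;> by_cases h3 : a.2 < b.2 <;>
    simp [h1, h2, h3, Prod.Lex.lt_iff] <;> omega

theorem pvPairs_snd_pairwise (ls : List Int) :
    (pvPairs ls).Pairwise (fun a b => a.2 ≠ b.2) := by
  rw [pvPairs, List.pairwise_map]
  exact List.Pairwise.imp (fun h => by omega) (PySem.List.pairwise_lt_enumerate ls 0)

theorem pvPairs_nodup (ls : List Int) : (pvPairs ls).Nodup := by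
  exact List.Pairwise.imp (fun h he => h (congrArg Prod.snd he)) (pvPairs_snd_pairwise ls)

theorem pvKey0_pairwise (ls : List Int) :
    (PySem.List.sorted2 (pvPairs ls) (fun q => q.1) (fun q => q.2)).Pairwise pvLt := by
  rw [pvSorted2_eq]
  have hperm : (PySem.List.sorted (pvPairs ls) (fun q => toLex q)).Perm (pvPairs ls) :=
    PySem.List.sorted_perm _ _ _
  have hle : (PySem.List.sorted (pvPairs ls) (fun q => toLex q)).Pairwise
      (fun a b => toLex a ≤ toLex b) := PySem.List.sorted_pairwise _ _
  have hnd : (PySem.List.sorted (pvPairs ls) (fun q => toLex q)).Nodup :=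
    (hperm.nodup_iff).mpr (pvPairs_nodup ls)
  exact (hle.and hnd).imp (fun h =>
    lt_of_le_of_ne h.1 (fun hE => h.2 (by simpa using hE)))

-- characterisation of a pairwise-sorted list through indices
theorem pvPairwise_getElem {l : List (Int × Int)} (h : l.Pairwise pvLt)
    {i j : Nat} (hi : i < l.length) (hj : j < l.length) (hij : i < j) :
    pvLt l[i] l[j] :=
  List.pairwise_iff_getElem.mp h i j hi hj hij

-- binary-search specification on a pvLt-sorted list
theorem pvBisect_spec (key : List (Int × Int)) (item : Int × Int)
    (hsort : key.Pairwise pvLt) :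
    ∀ f lo hi, hi - lo ≤ f → lo ≤ hi → hi ≤ key.length →
      (∀ k (hk : k < key.length), k < lo → pvTlt key[k] item = true) →
      (∀ k (hk : k < key.length), hi ≤ k → pvTlt key[k] item = false) →
      pvBisect key item lo hi ≤ hi ∧
      (∀ k (hk : k < key.length), k < pvBisect key item lo hi → pvTlt key[k] item = true) ∧
      (∀ k (hk : k < key.length), pvBisect key item lo hi ≤ k → pvTlt key[k] item = false) := by
  intro f
  induction f with
  | zero =>
    intro lo hi hf hle hhi hlow hhigh
    have heq : lo = hi := by omega
    rw [pvBisect, dif_neg (by omega)]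
    exact ⟨hle, hlow, fun k hk hik => hhigh k hk (heq ▸ hik)⟩
  | succ f ih =>
    intro lo hi hf hle hhi hlow hhigh
    by_cases h : lo < hi
    · have hmid : (lo + hi) / 2 < key.length := by omega
      have hget : PySem.List.pyGetD key (((lo + hi) / 2 : Nat) : Int) (0, 0) =
          key[(lo + hi) / 2] := by
        rw [PySem.List.pyGetD_natCast]
        exact List.getD_eq_getElem key (0, 0) hmid
      rw [pvBisect, dif_pos h]
      simp only [hget]
      by_cases hc : pvTlt key[(lo + hi) / 2] item = true
      · rw [if_pos hc]
        refine ih ((lo + hi) / 2 + 1) hi (by omega) (by omega) hhi ?_ hhigh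
        intro k hk hkmid
        rcases Nat.lt_or_ge k ((lo + hi) / 2) with hlt | hge
        · rw [pvTlt_iff]
          exact pvLt_trans (pvPairwise_getElem hsort hk hmid hlt) ((pvTlt_iff _ _).mp hc)
        · have : k = (lo + hi) / 2 := by omega
          subst this; exact hc
      · rw [if_neg hc]
        have hhigh' : ∀ k (hk : k < key.length), (lo + hi) / 2 ≤ k → pvTlt key[k] item = false := by
          intro k hk hkmid
          have hcn : ¬ pvLt key[(lo + hi) / 2] item := by
            rw [← pvTlt_iff]; exact hc
          rcases Nat.lt_or_ge ((lo + hi) / 2) k with hlt | hge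
          · rw [pvTlt_false_iff]
            intro hcon
            exact hcn (pvLt_trans (pvPairwise_getElem hsort hmid hk hlt) hcon)
          · have : k = (lo + hi) / 2 := by omega
            subst this
            rw [pvTlt_false_iff]; exact hcn
        obtain ⟨h1, h2, h3⟩ := ih lo ((lo + hi) / 2) (by omega) (by omega) (by omega) hlow hhigh'
        exact ⟨by omega, h2, h3⟩
    · have heq : lo = hi := by omega
      rw [pvBisect, dif_neg h]
      exact ⟨hle, hlow, fun k hk hik => hhigh k hk (heq ▸ hik)⟩

-- inserting at the binary-search position keeps the list sorted
theorem pvInsert_sorted (key : List (Int × Int)) (item : Int × Int) (r : Nat)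
    (hsort : key.Pairwise pvLt) (hr : r ≤ key.length)
    (hlt : ∀ k (hk : k < key.length), k < r → pvTlt key[k] item = true)
    (hge : ∀ k (hk : k < key.length), r ≤ k → pvTlt key[k] item = false)
    (hsnd : ∀ y ∈ key, y.2 ≠ item.2) :
    (key.take r ++ item :: key.drop r).Pairwise pvLt := by
  have htake : ∀ y ∈ key.take r, ∃ (i : Nat) (hi : i < key.length), i < r ∧ y = key[i] := by
    intro y hy
    obtain ⟨i, hi, hyi⟩ := List.mem_iff_getElem.mp hy
    have hil : i < key.length := by
      have := hi; rw [List.length_take] at this; omega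
    refine ⟨i, hil, ?_, ?_⟩
    · have := hi; rw [List.length_take] at this; omega
    · rw [← hyi, List.getElem_take]
  have hdrop : ∀ y ∈ key.drop r, ∃ (i : Nat) (hi : i < key.length), r ≤ i ∧ y = key[i] := by
    intro y hy
    obtain ⟨i, hi, hyi⟩ := List.mem_iff_getElem.mp hy
    have hil : r + i < key.length := by
      have := hi; rw [List.length_drop] at this; omega
    exact ⟨r + i, hil, by omega, by rw [← hyi, List.getElem_drop]⟩
  rw [List.pairwise_append]
  refine ⟨hsort.sublist (List.take_sublist r key), ?_, ?_⟩
  · rw [List.pairwise_cons]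
    refine ⟨?_, hsort.sublist (List.drop_sublist r key)⟩
    intro y hy
    obtain ⟨i, hi, hri, rfl⟩ := hdrop y hy
    have hne : item ≠ key[i] := by
      intro hE
      exact hsnd key[i] (List.getElem_mem hi) (by rw [← hE])
    exact pvLt_of_le_of_ne ((pvTlt_false_iff _ _).mp (hge i hi hri)) hne
  · intro a ha b hb
    obtain ⟨i, hi, hir, rfl⟩ := htake a ha
    rcases List.mem_cons.mp hb with rfl | hbd
    · exact (pvTlt_iff _ _).mp (hlt i hi hir)
    · obtain ⟨j, hj, hrj, rfl⟩ := hdrop b hbd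
      exact pvPairwise_getElem hsort hi hj (by omega)

-- one index-pair of pvPairs
theorem pvPairs_getElem_mem (ls : List Int) (i : Nat) (hi : i < ls.length) :
    (ls[i], -(i : Int)) ∈ pvPairs ls := by
  rw [pvPairs]
  refine List.mem_map.mpr ⟨((i : Int), ls[i]), ?_, rfl⟩
  exact (PySem.List.mem_enumerate_iff _ _ _).mpr ⟨i, hi, by simp⟩

theorem pvPairs_mem (ls : List Int) {p : Int × Int} (hp : p ∈ pvPairs ls) :
    ∃ (i : Nat) (hi : i < ls.length), p = (ls[i], -(i : Int)) := by
  rw [pvPairs] at hp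
  obtain ⟨q, hq, rfl⟩ := List.mem_map.mp hp
  obtain ⟨i, hi, rfl⟩ := (PySem.List.mem_enumerate_iff _ _ _).mp hq
  exact ⟨i, hi, by simp⟩

-- pvPairs of a list split at position k
theorem pvPairs_split (l₁ l₂ : List Int) (a : Int) :
    pvPairs (l₁ ++ a :: l₂) =
      pvPairs l₁ ++ (a, -(l₁.length : Int)) ::
        (PySem.List.enumerate l₂ ((l₁.length : Int) + 1)).map (fun p => (p.2, -p.1)) := by
  rw [pvPairs, pvPairs, PySem.List.enumerate_append, PySem.List.enumerate_cons, List.map_append]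
  simp

-- the main loop equivalence
theorem pvLoop_eq : ∀ (n : Nat) (ls : List Int) (key : List (Int × Int)) (temp : List Int),
    ls ≠ [] → key.Perm (pvPairs ls) → key.Pairwise pvLt →
    pvALoop n ls temp = pvBLoop n key temp := by
  intro n
  induction n with
  | zero => intro ls key temp _ _ _; rfl
  | succ n ih =>
    intro ls key temp hne hperm hsort
    have hlenp : (pvPairs ls).length = ls.length := by
      rw [pvPairs]; simp [PySem.List.length_enumerate]
    have hkey : key ≠ [] := by
      intro h
      apply hne
      have hlen := hperm.length_eq
      rw [h, hlenp] at hlen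
      exact List.length_eq_zero_iff.mp hlen.symm
    obtain ⟨v, ni, hvni⟩ : ∃ v ni, key.getLast hkey = (v, ni) :=
      ⟨(key.getLast hkey).1, (key.getLast hkey).2, rfl⟩
    have hkdec : key = key.dropLast ++ [(v, ni)] := by
      rw [← hvni, List.dropLast_append_getLast hkey]
    have hmem : (v, ni) ∈ pvPairs ls := hperm.subset (hkdec ▸ List.mem_append_right _ (by simp))
    obtain ⟨k, hk, hkeq⟩ := pvPairs_mem ls hmem
    have hv : v = ls[k] := congrArg Prod.fst hkeq
    have hni : ni = -(k : Int) := congrArg Prod.snd hkeq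
    -- every other pair is strictly below (v, ni)
    have hall : ∀ p ∈ pvPairs ls, p = (v, ni) ∨ pvLt p (v, ni) := by
      intro p hp
      have hpk : p ∈ key := hperm.symm.subset hp
      rw [hkdec] at hpk
      rcases List.mem_append.mp hpk with hL | hR
      · right
        have hs := hsort
        rw [hkdec, List.pairwise_append] at hs
        exact hs.2.2 p hL (v, ni) (by simp)
      · left; simpa using hR
    -- (v, ni) is the first maximum of ls
    have hmax : ∀ i (hi : i < ls.length), ls[i] ≤ v := by
      intro i hi
      rcases hall _ (pvPairs_getElem_mem ls i hi) with hE | hL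
      · exact le_of_eq (congrArg Prod.fst hE)
      · rcases Prod.Lex.lt_iff.mp hL with h1 | h1
        · exact le_of_lt h1
        · exact le_of_eq h1.1
    have hfirst : ∀ i (hi : i < ls.length), i < k → ls[i] < v := by
      intro i hi hik
      rcases hall _ (pvPairs_getElem_mem ls i hi) with hE | hL
      · exfalso
        have h2 : -(i : Int) = ni := congrArg Prod.snd hE
        rw [hni] at h2; omega
      · rcases Prod.Lex.lt_iff.mp hL with h1 | h1
        · exact h1
        · exfalso
          have h2 : -(i : Int) < ni := h1.2
          omega
    -- A's max() call returns v
    have hmaxeq : PySem.List.max? ls (fun x => x) = some v := by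
      obtain ⟨x, t, hxt⟩ := List.exists_cons_of_ne_nil hne
      rw [hxt, PySem.List.max?_id_cons]
      congr 1
      have hvls : v ∈ ls := hv ▸ List.getElem_mem hk
      have hub : ∀ y ∈ ls, y ≤ v := by
        intro y hy
        obtain ⟨i, hi, rfl⟩ := List.mem_iff_getElem.mp hy
        exact hmax i hi
      have h1 : t.foldl max x ≤ v := by
        rcases PySem.List.foldl_max_mem t x with hE | hM
        · rw [hE]; exact hub x (by rw [hxt]; exact List.mem_cons_self)
        · exact hub _ (by rw [hxt]; exact List.mem_cons_of_mem x hM)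
      have h2 : v ≤ t.foldl max x := by
        rw [hxt] at hvls
        rcases List.mem_cons.mp hvls with rfl | hvt
        · exact (PySem.List.le_foldl_max t v).1
        · exact (PySem.List.le_foldl_max t x).2 v hvt
      omega
    -- A's index() call returns k
    have hsplit : ls = ls.take k ++ v :: ls.drop (k + 1) := by
      rw [hv, List.getElem_cons_drop, List.take_append_drop]
    have hidx : PySem.List.index? ls v = some k := by
      rw [PySem.List.index?_eq_some_iff]
      refine ⟨ls.take k, ls.drop (k + 1), hsplit, ?_, ?_⟩
      · rw [List.length_take]; omega
      · intro hvmem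
        obtain ⟨i, hi, hyi⟩ := List.mem_iff_getElem.mp hvmem
        have hil : i < ls.length := by
          have h3 := hi; rw [List.length_take] at h3; omega
        have hik : i < k := by
          have h3 := hi; rw [List.length_take] at h3; omega
        rw [List.getElem_take] at hyi
        exact absurd hyi (ne_of_lt (hfirst i hil hik))
    -- A's decrement
    have hgetD : ls.getD k 0 = v := by
      rw [List.getD_eq_getElem ls 0 hk, hv]
    have hset : ls.set k (ls.getD k 0 - 1) = ls.take k ++ (v - 1) :: ls.drop (k + 1) := by
      rw [hgetD, List.set_eq_take_append_cons_drop, if_pos hk]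
    -- B's pop
    have hpop : PySem.List.pop? key = some ((v, ni), key.dropLast) := by
      conv_lhs => rw [hkdec]
      exact PySem.List.pop?_last _ _
    have hsortL : key.dropLast.Pairwise pvLt := by
      have hs := hsort
      rw [hkdec, List.pairwise_append] at hs
      exact hs.1
    have hlentake : (ls.take k).length = k := by rw [List.length_take]; omega
    -- the two halves of pvPairs ls around position k
    have hpairs_eq : pvPairs ls = pvPairs (ls.take k) ++ (v, ni) ::
        (PySem.List.enumerate (ls.drop (k + 1)) ((k : Int) + 1)).map (fun p => (p.2, -p.1)) := by
      conv_lhs => rw [hsplit]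
      rw [pvPairs_split, hlentake, hni]
    have hLperm : key.dropLast.Perm
        (pvPairs (ls.take k) ++
          (PySem.List.enumerate (ls.drop (k + 1)) ((k : Int) + 1)).map (fun p => (p.2, -p.1))) := by
      have ha : key.Perm ((v, ni) :: key.dropLast) := by
        conv_lhs => rw [hkdec]
        exact List.perm_append_singleton _ _
      have hb : (pvPairs ls).Perm ((v, ni) :: (pvPairs (ls.take k) ++
          (PySem.List.enumerate (ls.drop (k + 1)) ((k : Int) + 1)).map (fun p => (p.2, -p.1)))) := by
        rw [hpairs_eq]
        exact List.perm_middle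
      exact (ha.symm.trans (hperm.trans hb)).cons_inv
    -- the snd components in the popped list all differ from ni
    have hsnd : ∀ y ∈ key.dropLast, y.2 ≠ ((v - 1 : Int), ni).2 := by
      intro y hy
      rcases List.mem_append.mp (hLperm.subset hy) with h1 | h1
      · obtain ⟨i, hi, rfl⟩ := pvPairs_mem _ h1
        have hik : i < k := by rw [hlentake] at hi; omega
        simp only [hni]
        omega
      · obtain ⟨q, hq, rfl⟩ := List.mem_map.mp h1
        obtain ⟨j, hj, rfl⟩ := (PySem.List.mem_enumerate_iff _ _ _).mp hq
        simp only [hni]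
        omega
    -- B's binary search and insertion
    have hspec := pvBisect_spec key.dropLast ((v - 1 : Int), ni) hsortL key.dropLast.length
      0 key.dropLast.length (by omega) (by omega) (le_refl _)
      (fun k' hk' h => absurd h (Nat.not_lt_zero k'))
      (fun k' hk' h => absurd hk' (by omega))
    obtain ⟨hrle, hblt, hbge⟩ := hspec
    have hins : PySem.List.insert key.dropLast
        ((pvBisect key.dropLast ((v - 1 : Int), ni) 0 key.dropLast.length : Nat) : Int)
        ((v - 1 : Int), ni) =
        key.dropLast.take (pvBisect key.dropLast ((v - 1 : Int), ni) 0 key.dropLast.length) ++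
          ((v - 1 : Int), ni) ::
          key.dropLast.drop (pvBisect key.dropLast ((v - 1 : Int), ni) 0 key.dropLast.length) :=
      PySem.List.insert_natCast _ _ _ hrle
    -- the new states still satisfy the invariant
    have hsort' : (key.dropLast.take (pvBisect key.dropLast ((v - 1 : Int), ni) 0 key.dropLast.length) ++
        ((v - 1 : Int), ni) ::
        key.dropLast.drop (pvBisect key.dropLast ((v - 1 : Int), ni) 0 key.dropLast.length)).Pairwise pvLt :=
      pvInsert_sorted _ _ _ hsortL hrle hblt hbge hsnd
    have hpairs_eq' : pvPairs (ls.set k (ls.getD k 0 - 1)) =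
        pvPairs (ls.take k) ++ ((v - 1 : Int), ni) ::
          (PySem.List.enumerate (ls.drop (k + 1)) ((k : Int) + 1)).map (fun p => (p.2, -p.1)) := by
      rw [hset, pvPairs_split, hlentake, hni]
    have hperm' : (key.dropLast.take (pvBisect key.dropLast ((v - 1 : Int), ni) 0 key.dropLast.length) ++
        ((v - 1 : Int), ni) ::
        key.dropLast.drop (pvBisect key.dropLast ((v - 1 : Int), ni) 0 key.dropLast.length)).Perm
        (pvPairs (ls.set k (ls.getD k 0 - 1))) := by
      rw [hpairs_eq']
      have hstep1 : (key.dropLast.take (pvBisect key.dropLast ((v - 1 : Int), ni) 0 key.dropLast.length) ++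
          ((v - 1 : Int), ni) ::
          key.dropLast.drop (pvBisect key.dropLast ((v - 1 : Int), ni) 0 key.dropLast.length)).Perm
          (((v - 1 : Int), ni) :: key.dropLast) := by
        have h := List.perm_middle (a := ((v - 1 : Int), ni))
          (l₁ := key.dropLast.take (pvBisect key.dropLast ((v - 1 : Int), ni) 0 key.dropLast.length))
          (l₂ := key.dropLast.drop (pvBisect key.dropLast ((v - 1 : Int), ni) 0 key.dropLast.length))
        rwa [List.take_append_drop] at h
      exact hstep1.trans ((hLperm.cons _).trans List.perm_middle.symm)
    have hne' : ls.set k (ls.getD k 0 - 1) ≠ [] := by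
      intro h
      apply hne
      have hlen := congrArg List.length h
      rw [List.length_set] at hlen
      exact List.length_eq_zero_iff.mp hlen
    have hnik : -ni = (k : Int) := by omega
    -- one step on each side, then the induction hypothesis
    simp only [pvALoop, pvBLoop, hmaxeq, hidx, hpop, hnik]
    rw [hins]
    exact ih _ _ _ hne' hperm' hsort'

-- ===== VERDICT (by name: the statement is the Claim_ definition above) =====
theorem find_maximum_N_spec : Claim_equal_find_maximum_N := by
  intro LS N hdom hpre
  unfold Pre_find_maximum_N at hpre
  unfold Spec_find_maximum_N find_maximum_N find_maximum_N_alt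
  rw [PySem.List.slice_none_none]
  by_cases hls : LS = []
  · subst hls
    have hN : N ≤ 0 := by
      rcases hpre with h | h
      · exact absurd rfl h
      · exact h
    rw [Int.toNat_of_nonpos hN]
    rfl
  · refine pvLoop_eq N.toNat LS _ [] hls ?_ ?_
    · exact PySem.List.sorted2_perm (pvPairs LS) _ _ _
    · exact pvKey0_pairwise LS
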